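-- pv_equiv track=rewrite | github.com/ww785612/Key_Point_Detector | mp2.py | clusterKeyPoints
-- ===== SOURCE A (Python) =====
-- import copy
--
-- def clusterKeyPoints(keypointList):
--     clusters = {}
--     for element in keypointList:
--         keyRow = int(round(element[0]/30))
--         keyCol = int(round(element[1]/30))
--         if (keyRow, keyCol) in clusters:
--             clusters[(keyRow, keyCol)].append(element)
--         else:
--             clusters[(keyRow, keyCol)] = [element]
--     clusteredKeypointList = []
--     for key in clusters:
--         dominantResp = [0,0,0,-1]
--         for keyEntry in clusters[key]:
--             if (keyEntry[3] > dominantResp[3]):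
--                 dominantResp = copy.deepcopy(keyEntry)
--         clusteredKeypointList.append(dominantResp)
--     return clusteredKeypointList
-- ===== SOURCE B (Python) =====
-- import copy
--
-- def clusterKeyPoints(keypointList):
--     best = {}
--     for element in keypointList:
--         key = (int(round(element[0]/30)), int(round(element[1]/30)))
--         if key not in best:
--             best[key] = [0, 0, 0, -1]
--         if element[3] > best[key][3]:
--             best[key] = copy.deepcopy(element)
--     return list(best.values())
-- ===== Notes on version B (the rewrite author's own statement) =====
-- stated objective: simpler
-- what changed: A groups keypoints into per-cell lists and then scans each list for the max-response entry; B does one pass keeping only the running best keypoint per grid cell in a dict and returns its values.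
import Mathlib
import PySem

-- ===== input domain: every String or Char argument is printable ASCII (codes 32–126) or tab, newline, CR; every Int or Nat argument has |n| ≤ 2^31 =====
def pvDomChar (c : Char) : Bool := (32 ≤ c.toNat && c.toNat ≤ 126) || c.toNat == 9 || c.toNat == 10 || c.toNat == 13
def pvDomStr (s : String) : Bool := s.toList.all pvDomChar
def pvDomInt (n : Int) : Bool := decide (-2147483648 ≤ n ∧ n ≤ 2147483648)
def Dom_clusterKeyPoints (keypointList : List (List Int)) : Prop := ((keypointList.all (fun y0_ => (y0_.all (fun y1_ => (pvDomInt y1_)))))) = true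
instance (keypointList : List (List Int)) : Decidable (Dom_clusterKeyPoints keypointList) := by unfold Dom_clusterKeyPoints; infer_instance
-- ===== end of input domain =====

-- B replaces A's two-phase group-then-max (build per-cell lists, then scan each list for
-- the max-response entry) by a single pass keeping only the running best per cell; simpler.

-- element[i]; Pre_ guarantees the index is in range, so the .getD 0 default is never used.
def pvGetE (l : List Int) (i : Int) : Int := (PySem.List.pyGet? l i).getD 0

-- int(round(n/30)): Python rounds the float n/30 half-to-even. For |n| ≤ 2^31 (the Dom)
-- this integer computation is exact: an exact half n/30 = m/2 is an exactly representable
-- float, and otherwise the true value is ≥ 1/30 away from any .5 boundary, far above the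
-- float rounding error of n/30.
def pvRound30 (n : Int) : Int :=
  let q := PySem.Int.floordiv n 30
  let r := PySem.Int.mod n 30
  if r < 15 then q
  else if 15 < r then q + 1
  else if PySem.Int.mod q 2 = 0 then q else q + 1

def pvKey (e : List Int) : Int × Int := (pvRound30 (pvGetE e 0), pvRound30 (pvGetE e 1))

-- ===== PORT A =====
def clusterKeyPoints (keypointList : List (List Int)) : List (List Int) :=
  let clusters : PySem.Dict (Int × Int) (List (List Int)) :=
    keypointList.foldl (fun d element =>
      let key := pvKey element
      if d.contains key then d.insert key (d.getD key [] ++ [element])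
      else d.insert key [element]) PySem.Dict.empty
  clusters.items.foldl (fun acc kv =>
    let dominantResp := kv.2.foldl (fun dominantResp keyEntry =>
      if pvGetE keyEntry 3 > pvGetE dominantResp 3 then keyEntry else dominantResp)
      [0, 0, 0, -1]
    acc ++ [dominantResp]) []

-- ===== PORT B =====
def clusterKeyPoints_alt (keypointList : List (List Int)) : List (List Int) :=
  let best : PySem.Dict (Int × Int) (List Int) :=
    keypointList.foldl (fun d element =>
      let key := pvKey element
      let d := if d.contains key then d else d.insert key [0, 0, 0, -1]
      if pvGetE element 3 > pvGetE (d.getD key [0, 0, 0, -1]) 3 then d.insert key element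
      else d) PySem.Dict.empty
  best.values

-- ===== PRECONDITION & SPEC =====
-- Pre_ excludes exactly the inputs on which Python A raises IndexError: an element
-- shorter than 4 entries (element[0], element[1] and keyEntry[3] are accessed).
def Pre_clusterKeyPoints (keypointList : List (List Int)) : Prop :=
  ∀ e ∈ keypointList, 4 ≤ e.length
instance (keypointList : List (List Int)) : Decidable (Pre_clusterKeyPoints keypointList) := by unfold Pre_clusterKeyPoints; infer_instance

def pvWitness_clusterKeyPoints : List (List Int) := [[1, 2, 3, 4], [31, 2, 3, 9], [0, 0, 0, 0]]

def Spec_clusterKeyPoints (keypointList : List (List Int)) (out : List (List Int)) : Prop := out = clusterKeyPoints_alt keypointList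
instance (keypointList : List (List Int)) (out : List (List Int)) : Decidable (Spec_clusterKeyPoints keypointList out) := by unfold Spec_clusterKeyPoints; infer_instance

-- ===== CLAIM (what is proved, stated in full; the proofs are below) =====
def Claim_equal_clusterKeyPoints : Prop := ∀ (keypointList : List (List Int)), Dom_clusterKeyPoints keypointList → Pre_clusterKeyPoints keypointList → Spec_clusterKeyPoints keypointList (clusterKeyPoints keypointList)

-- ===== LEMMAS AND PROOFS =====

-- the per-cluster max-scan of A's second phase
def pvBetter (dom e : List Int) : List Int :=
  if pvGetE e 3 > pvGetE dom 3 then e else dom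

def pvBestOf (l : List (List Int)) : List Int := l.foldl pvBetter [0, 0, 0, -1]

def pvF (p : (Int × Int) × List (List Int)) : (Int × Int) × List Int := (p.1, pvBestOf p.2)

lemma get?_map_pvF (la : List ((Int × Int) × List (List Int))) (k : Int × Int) :
    (PySem.Dict.mk (la.map pvF)).get? k = ((PySem.Dict.mk la).get? k).map pvBestOf := by
  induction la with
  | nil => rfl
  | cons p rest ih =>
    simp only [List.map_cons, pvF]
    rw [PySem.Dict.get?_mk_cons, PySem.Dict.get?_mk_cons]
    by_cases hk : (p.1 == k) = true <;> simp [hk, ih]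

lemma contains_map_pvF (la : List ((Int × Int) × List (List Int))) (k : Int × Int) :
    (PySem.Dict.mk (la.map pvF)).contains k = (PySem.Dict.mk la).contains k := by
  rw [PySem.Dict.contains_eq_isSome_get?, PySem.Dict.contains_eq_isSome_get?, get?_map_pvF]
  cases (PySem.Dict.mk la).get? k <;> rfl

-- loop invariant: B's dict is A's dict with every cluster list collapsed to its running best
lemma pv_inv (kl : List (List Int)) :
    ∀ (dA : PySem.Dict (Int × Int) (List (List Int))) (dB : PySem.Dict (Int × Int) (List Int)),
    dA.keys.Nodup →
    dB.items = dA.items.map pvF →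
    (kl.foldl (fun d element =>
      let key := pvKey element
      let d := if d.contains key then d else d.insert key [0, 0, 0, -1]
      if pvGetE element 3 > pvGetE (d.getD key [0, 0, 0, -1]) 3 then d.insert key element
      else d) dB).items =
    (kl.foldl (fun d element =>
      let key := pvKey element
      if d.contains key then d.insert key (d.getD key [] ++ [element])
      else d.insert key [element]) dA).items.map pvF := by
  induction kl with
  | nil => intro dA dB _ h; simpa using h
  | cons e rest ih =>
    intro dA dB hnd h
    simp only [List.foldl_cons]
    have hcont : dB.contains (pvKey e) = dA.contains (pvKey e) := by
      cases dB with
      | mk lb => cases dA with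
        | mk la =>
          subst h
          exact contains_map_pvF la (pvKey e)
    have hget : dB.get? (pvKey e) = (dA.get? (pvKey e)).map pvBestOf := by
      cases dB with
      | mk lb => cases dA with
        | mk la =>
          subst h
          exact get?_map_pvF la (pvKey e)
    by_cases hc : dA.contains (pvKey e) = true
    · -- existing cell: A appends; B compares against the stored running best
      obtain ⟨old, hold⟩ : ∃ old, dA.get? (pvKey e) = some old := by
        rw [PySem.Dict.contains_eq_isSome_get?] at hc
        exact Option.isSome_iff_exists.mp hc
      have hBD : dB.getD (pvKey e) [0, 0, 0, -1] = pvBestOf old := by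
        rw [PySem.Dict.getD_eq_get?_getD, hget, hold]; rfl
      have hAD : dA.getD (pvKey e) [] = old := by
        rw [PySem.Dict.getD_eq_get?_getD, hold]; rfl
      simp only [hcont, hc, hBD, hAD, reduceIte]
      apply ih
      · rw [PySem.Dict.keys_insert_of_contains _ _ hc]; exact hnd
      have hbest : pvBestOf (old ++ [e]) = pvBetter (pvBestOf old) e := by
        simp [pvBestOf, List.foldl_append]
      by_cases hgt : pvGetE e 3 > pvGetE (pvBestOf old) 3
      · simp only [hgt, if_true]
        rw [PySem.Dict.items_insert_of_contains _ _ (by rw [hcont]; exact hc),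
            PySem.Dict.items_insert_of_contains _ _ hc, h, List.map_map, List.map_map]
        apply List.map_congr_left
        intro p _
        by_cases hk : (p.1 == pvKey e) = true
        · simp [Function.comp, pvF, hk, hbest, pvBetter, hgt]
        · simp [Function.comp, pvF, hk]
      · simp only [hgt, if_false, h]
        rw [PySem.Dict.items_insert_of_contains _ _ hc, List.map_map]
        apply List.map_congr_left
        intro p hp
        by_cases hk : (p.1 == pvKey e) = true
        · have hkey : p.1 = pvKey e := by exact eq_of_beq hk
          have hpv : p.2 = old := by
            have h1 : dA.get? p.1 = some p.2 := by
              exact PySem.Dict.get?_of_mem_items dA (by cases p; exact hp) hnd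
            rw [hkey, hold] at h1
            exact (Option.some_inj.mp h1).symm
          simp only [Function.comp, hk, if_true, pvF]
          rw [← hkey, hpv, hbest]
          simp [pvBetter, hgt, hkey]
        · simp [Function.comp, pvF, hk]
    · -- fresh cell: A starts [e]; B seeds the sentinel then compares e against it
      have hc' : dA.contains (pvKey e) = false := by simpa using hc
      simp only [hcont, hc', Bool.false_eq_true, reduceIte]
      apply ih
      · rw [PySem.Dict.keys_insert_of_not_contains _ _ hc']
        refine List.Nodup.append hnd (List.nodup_singleton _) ?_
        intro a ha hb
        rw [List.mem_singleton] at hb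
        subst hb
        rw [← PySem.Dict.contains_iff_mem_keys] at ha
        rw [ha] at hc'
        simp at hc'
      have hBD : (dB.insert (pvKey e) [0, 0, 0, -1]).getD (pvKey e) [0, 0, 0, -1]
          = [0, 0, 0, -1] := PySem.Dict.getD_insert_self _ _ _ _
      rw [hBD]
      by_cases hgt : pvGetE e 3 > pvGetE ([0, 0, 0, -1] : List Int) 3
      · simp only [hgt, if_true, PySem.Dict.insert_insert_self]
        rw [PySem.Dict.items_insert_of_not_contains _ _ (by rw [hcont]; exact hc'),
            PySem.Dict.items_insert_of_not_contains _ _ hc', h, List.map_append]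
        simp [pvF, pvBestOf, pvBetter, hgt]
      · simp only [hgt, if_false]
        rw [PySem.Dict.items_insert_of_not_contains _ _ (by rw [hcont]; exact hc'),
            PySem.Dict.items_insert_of_not_contains _ _ hc', h, List.map_append]
        simp [pvF, pvBestOf, pvBetter, hgt]

-- ===== VERDICT (by name: the statement is the Claim_ definition above) =====
theorem clusterKeyPoints_spec : Claim_equal_clusterKeyPoints := by
  intro kl _ _
  show clusterKeyPoints kl = clusterKeyPoints_alt kl
  simp only [clusterKeyPoints, clusterKeyPoints_alt]
  rw [PySem.List.foldl_append_singleton_eq_map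
      (f := fun kv : (Int × Int) × List (List Int) => kv.2.foldl (fun dominantResp keyEntry =>
        if pvGetE keyEntry 3 > pvGetE dominantResp 3 then keyEntry else dominantResp)
        [0, 0, 0, -1])]
  rw [PySem.Dict.values,
      pv_inv kl PySem.Dict.empty PySem.Dict.empty PySem.Dict.nodup_keys_empty rfl,
      List.map_map]
  refine (List.map_congr_left ?_).symm.trans (List.nil_append _).symm
  intro p _
  show (pvF p).2 = _
  rfl
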